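-- pv_equiv track=rewrite | github.com/aakanksha-j/LeetCode | Graph/Union Find Disjoint Set/947. Most Stones Removed with Same Row or Column/union_find_disjoint_set_1.py | removeStones
-- ===== SOURCE A (Python) =====
-- from typing import List
--
-- def removeStones(stones: List[List[int]]) -> int:
--     uf = {}
--
--     def find(x):
--         if x != uf[x]:
--             uf[x] = find(uf[x])
--         return uf[x]
--
--     def union(x, y):
--         if x not in uf:
--             uf[x] = x
--         if y not in uf:
--             uf[y] = y
--         rootX = find(x)
--         rootY = find(y)
--         uf[rootX] = rootY
--
--     # range of x,y: 0 to 10^4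
--     maxX = 10**4
--     for x, y in stones:
--         union(x, y + maxX)
--
--     return len(stones) - len({find(key) for key in uf})
-- ===== SOURCE B (Python) =====
-- def removeStones(stones):
--     # Merge-sets approach: keep the connected components as an explicit list of
--     # node sets (node = x, or y + 10**4 for columns) and merge per stone.
--     comps = []
--     for x, y in stones:
--         a, b = x, y + 10**4
--         merged = {a, b}
--         rest = []
--         for c in comps:
--             if a in c or b in c:
--                 merged |= c
--             else:
--                 rest.append(c)
--         comps = rest + [merged]
--     return len(stones) - len(comps)
-- ===== Notes on version B (the rewrite author's own statement) =====
-- stated objective: alternative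
-- what changed: Replaced the path-compressing union-find parent dict (recursive find + distinct-root counting) by an explicit list of component node-sets that are merged per stone, returning len(stones) - len(comps).
import Mathlib
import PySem

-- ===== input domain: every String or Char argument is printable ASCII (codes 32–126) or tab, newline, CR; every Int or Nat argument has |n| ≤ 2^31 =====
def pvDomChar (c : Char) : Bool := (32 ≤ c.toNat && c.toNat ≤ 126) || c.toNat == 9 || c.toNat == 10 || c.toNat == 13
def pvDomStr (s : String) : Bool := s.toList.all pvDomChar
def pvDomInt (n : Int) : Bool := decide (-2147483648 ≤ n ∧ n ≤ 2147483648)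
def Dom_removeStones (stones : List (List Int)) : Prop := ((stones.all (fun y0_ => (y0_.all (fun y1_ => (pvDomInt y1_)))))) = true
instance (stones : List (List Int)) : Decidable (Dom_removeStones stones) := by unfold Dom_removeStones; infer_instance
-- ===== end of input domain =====

-- B replaces A's path-compressing union-find dict by an explicit list of component
-- node-sets merged per stone (alternative decomposition; equivalence of RETURN values).

-- ===== PORT A =====
-- find(x): recursive find with path compression; fuel d.size suffices on the forest
-- dicts the program builds (the 0/none branches are unreachable at runtime: in Python
-- find is only called on present keys of an acyclic parent map).
def findA : Nat → PySem.Dict Int Int → Int → Int × PySem.Dict Int Int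
  | 0, d, x => (x, d)
  | f + 1, d, x =>
    match d.get? x with
    | none => (x, d)
    | some p =>
      if p = x then (x, d)
      else
        let rd := findA f d p
        (rd.1, rd.2.insert x rd.1)

def unionA (d : PySem.Dict Int Int) (x y : Int) : PySem.Dict Int Int :=
  let d1 := if d.contains x then d else d.insert x x
  let d2 := if d1.contains y then d1 else d1.insert y y
  let r1 := findA d2.size d2 x
  let r2 := findA r1.2.size r1.2 y
  r2.2.insert r1.1 r2.1

def removeStones (stones : List (List Int)) : Int :=
  let uf := stones.foldl (fun d s =>
    match s with
    | [x, y] => unionA d x (y + 10 ^ 4)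
    | _ => d) PySem.Dict.empty   -- non-pairs raise ValueError in Python: excluded by Pre_
  let fin := uf.keys.foldl (fun (p : PySem.Set Int × PySem.Dict Int Int) k =>
    let rd := findA p.2.size p.2 k
    (PySem.Set.add p.1 rd.1, rd.2)) (PySem.Set.empty, uf)
  (stones.length : Int) - fin.1.length

-- ===== PORT B =====
def bStep (comps : List (PySem.Set Int)) (a b : Int) : List (PySem.Set Int) :=
  let mr := comps.foldl (fun (p : PySem.Set Int × List (PySem.Set Int)) c =>
      if a ∈ c ∨ b ∈ c then (PySem.Set.union p.1 c, p.2) else (p.1, p.2 ++ [c]))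
    (PySem.Set.ofList [a, b], [])
  mr.2 ++ [mr.1]

def bApply (comps : List (PySem.Set Int)) (s : List Int) : List (PySem.Set Int) :=
  -- 'x, y = s' (non-pairs raise ValueError in Python: excluded by Pre_)
  if s.length = 2 then bStep comps (s.getD 0 0) (s.getD 1 0 + 10 ^ 4) else comps

def removeStones_alt (stones : List (List Int)) : Int :=
  let comps := stones.foldl bApply []
  (stones.length : Int) - comps.length

-- ===== PRECONDITION & SPEC =====
-- Pre_ excludes exactly the inputs where Python's 'for x, y in stones' raises
-- ValueError (an inner list whose length is not 2); both A and B raise there.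
def Pre_removeStones (stones : List (List Int)) : Prop := ∀ s ∈ stones, s.length = 2
instance (stones : List (List Int)) : Decidable (Pre_removeStones stones) := by unfold Pre_removeStones; infer_instance
def pvWitness_removeStones : List (List Int) := [[0, 0], [1, 0], [1, 2], [5, 5]]

def Spec_removeStones (stones : List (List Int)) (out : Int) : Prop := out = removeStones_alt stones
instance (stones : List (List Int)) (out : Int) : Decidable (Spec_removeStones stones out) := by unfold Spec_removeStones; infer_instance

-- ===== CLAIM (what is proved, stated in full; the proofs are below) =====
def Claim_equal_removeStones : Prop := ∀ (stones : List (List Int)), Dom_removeStones stones → Pre_removeStones stones → Spec_removeStones stones (removeStones stones)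

-- ===== LEMMAS AND PROOFS =====

-- Parent-chain root with fuel: rootAux d f x follows the parent map f steps at most.
def rootAux (d : PySem.Dict Int Int) : Nat → Int → Option Int
  | 0, _ => none
  | f + 1, x =>
    match d.get? x with
    | none => none
    | some p => if p = x then some x else rootAux d f p

-- x's root in d (fuel-free, relational).
def Root (d : PySem.Dict Int Int) (x r : Int) : Prop := ∃ f, rootAux d f x = some r

-- d is a well-formed parent forest: parents are keys, and following parents terminates
-- (witnessed by a strictly decreasing measure on non-self edges).
def Forest (d : PySem.Dict Int Int) : Prop :=
  (∀ x p, d.get? x = some p → (d.get? p).isSome) ∧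
  (∃ h : Int → Nat, ∀ x p, d.get? x = some p → p ≠ x → h p < h x)

theorem rootAux_mono (d : PySem.Dict Int Int) :
    ∀ f x r g, rootAux d f x = some r → f ≤ g → rootAux d g x = some r := by
  intro f
  induction f with
  | zero => intro x r g h; simp [rootAux] at h
  | succ f ih =>
    intro x r g h hle
    obtain ⟨g', rfl⟩ : ∃ g', g = g' + 1 := ⟨g - 1, by omega⟩
    simp only [rootAux] at h ⊢
    cases hx : d.get? x with
    | none => simp [hx] at h
    | some p =>
      simp only [hx] at h ⊢
      by_cases hpx : p = x
      · simpa [hpx] using h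
      · simp only [if_neg hpx] at h ⊢
        exact ih p r g' h (by omega)

theorem root_unique (d : PySem.Dict Int Int) (x r r' : Int)
    (h1 : Root d x r) (h2 : Root d x r') : r = r' := by
  obtain ⟨f1, h1⟩ := h1
  obtain ⟨f2, h2⟩ := h2
  have e1 := rootAux_mono d f1 x r (max f1 f2) h1 (le_max_left _ _)
  have e2 := rootAux_mono d f2 x r' (max f1 f2) h2 (le_max_right _ _)
  rw [e1] at e2; exact Option.some.inj e2

theorem root_self (d : PySem.Dict Int Int) :
    ∀ f x r, rootAux d f x = some r → d.get? r = some r := by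
  intro f
  induction f with
  | zero => intro x r h; simp [rootAux] at h
  | succ f ih =>
    intro x r h
    simp only [rootAux] at h
    cases hx : d.get? x with
    | none => simp [hx] at h
    | some p =>
      simp only [hx] at h
      by_cases hpx : p = x
      · subst hpx; simp at h; rw [← h]; exact hx
      · simp only [if_neg hpx] at h; exact ih p r h

theorem root_isSome (d : PySem.Dict Int Int) (x r : Int) (h : Root d x r) :
    (d.get? x).isSome := by
  obtain ⟨f, h⟩ := h
  cases f with
  | zero => simp [rootAux] at h
  | succ f =>
    simp only [rootAux] at h
    cases hx : d.get? x with
    | none => simp [hx] at h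
    | some p => simp

theorem root_step (d : PySem.Dict Int Int) (x p r : Int)
    (hx : d.get? x = some p) (hpx : p ≠ x) (h : Root d p r) : Root d x r := by
  obtain ⟨f, h⟩ := h
  exact ⟨f + 1, by simp [rootAux, hx, hpx, h]⟩

theorem root_of_self (d : PySem.Dict Int Int) (x : Int) (hx : d.get? x = some x) :
    Root d x x := ⟨1, by simp [rootAux, hx]⟩

theorem root_h_lt (d : PySem.Dict Int Int) (h : Int → Nat)
    (hm : ∀ x p, d.get? x = some p → p ≠ x → h p < h x) :
    ∀ f x r, rootAux d f x = some r → r = x ∨ h r < h x := by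
  intro f
  induction f with
  | zero => intro x r hr; simp [rootAux] at hr
  | succ f ih =>
    intro x r hr
    simp only [rootAux] at hr
    cases hx : d.get? x with
    | none => simp [hx] at hr
    | some p =>
      simp only [hx] at hr
      by_cases hpx : p = x
      · simp [hpx] at hr; exact Or.inl hr.symm
      · simp only [if_neg hpx] at hr
        have hlt := hm x p hx hpx
        rcases ih p r hr with rfl | hrp
        · right; exact hlt
        · right; omega

theorem forest_total (d : PySem.Dict Int Int) (hF : Forest d) :
    ∀ x, (d.get? x).isSome → ∃ r, Root d x r := by
  obtain ⟨hc, h, hm⟩ := hF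
  suffices H : ∀ n x, h x ≤ n → (d.get? x).isSome → ∃ r, Root d x r by
    intro x hx; exact H (h x) x le_rfl hx
  intro n
  induction n with
  | zero =>
    intro x hn hx
    obtain ⟨p, hp⟩ := Option.isSome_iff_exists.mp hx
    by_cases hpx : p = x
    · exact ⟨x, root_of_self d x (hpx ▸ hp)⟩
    · exact absurd (hm x p hp hpx) (by omega)
  | succ n ih =>
    intro x hn hx
    obtain ⟨p, hp⟩ := Option.isSome_iff_exists.mp hx
    by_cases hpx : p = x
    · exact ⟨x, root_of_self d x (hpx ▸ hp)⟩
    · have := hm x p hp hpx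
      obtain ⟨r, hr⟩ := ih p (by omega) (hc x p hp)
      exact ⟨r, root_step d x p r hp hpx hr⟩

theorem dict_size_keys (d : PySem.Dict Int Int) : d.size = d.keys.length := by
  simp [PySem.Dict.size, PySem.Dict.keys]

theorem mem_keys_of_isSome (d : PySem.Dict Int Int) (x : Int)
    (h : (d.get? x).isSome) : x ∈ d.keys := by
  by_contra hx
  rw [← PySem.Dict.get?_eq_none_iff_not_mem_keys] at hx
  simp [hx] at h

-- In a forest with Nodup keys, fuel d.size is always enough for rootAux.
theorem rootAux_size (d : PySem.Dict Int Int) (hF : Forest d) :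
    ∀ f x r, rootAux d f x = some r → rootAux d d.size x = some r := by
  obtain ⟨hc, h, hm⟩ := hF
  have aux : ∀ f x r (V : List Int), rootAux d f x = some r → V ⊆ d.keys → V.Nodup →
      (∀ v ∈ V, h x < h v) → rootAux d (d.keys.length - V.length) x = some r := by
    intro f
    induction f with
    | zero => intro x r V hr; simp [rootAux] at hr
    | succ f ih =>
      intro x r V hr hVsub hVnd hVlt
      simp only [rootAux] at hr
      cases hx : d.get? x with
      | none => simp [hx] at hr
      | some p =>
        simp only [hx] at hr
        have hxk : x ∈ d.keys := mem_keys_of_isSome d x (by simp [hx])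
        have hxV : x ∉ V := fun hmem => absurd (hVlt x hmem) (by omega)
        have hsub' : (x :: V) ⊆ d.keys := by
          intro z hz; rcases List.mem_cons.mp hz with rfl | hz
          · exact hxk
          · exact hVsub hz
        have hlen : (x :: V).length ≤ d.keys.length :=
          (List.subperm_of_subset (hVnd.cons hxV) hsub').length_le
        by_cases hpx : p = x
        · simp only [if_pos hpx] at hr
          obtain ⟨m, hmv⟩ : ∃ m, d.keys.length - V.length = m + 1 :=
            ⟨d.keys.length - V.length - 1, by simp at hlen; omega⟩
          obtain rfl : x = r := Option.some.inj hr
          rw [hmv]; simp [rootAux, hx, hpx]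
        · simp only [if_neg hpx] at hr
          have hrec := ih p r (x :: V) hr hsub' (hVnd.cons hxV)
            (by intro v hv; rcases List.mem_cons.mp hv with rfl | hv
                · exact hm _ _ hx hpx
                · exact lt_trans (hm _ _ hx hpx) (hVlt v hv))
          obtain ⟨m, hmv⟩ : ∃ m, d.keys.length - V.length = m + 1 :=
            ⟨d.keys.length - V.length - 1, by simp at hlen; omega⟩
          rw [hmv]; simp only [rootAux, hx, if_neg hpx]
          apply rootAux_mono d _ p r _ hrec
          simp at hlen ⊢; omega
  intro f x r hr
  rw [dict_size_keys]
  have := aux f x r [] hr (by simp) (by simp) (by simp)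
  simpa using this

-- Root only depends on the lookup function.
theorem rootAux_congr (d d' : PySem.Dict Int Int)
    (h : ∀ z, d'.get? z = d.get? z) : ∀ f x, rootAux d' f x = rootAux d f x := by
  intro f
  induction f with
  | zero => intro x; simp [rootAux]
  | succ f ih =>
    intro x
    simp only [rootAux, h x]
    cases d.get? x with
    | none => rfl
    | some p =>
      by_cases hpx : p = x <;> simp [hpx, ih p]

-- Backward transport for free from totality and uniqueness.
theorem root_iff_of_transport (d d' : PySem.Dict Int Int)
    (hF : Forest d)
    (hkeys : ∀ z, (d'.get? z).isSome ↔ (d.get? z).isSome)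
    (fwd : ∀ z s, Root d z s → Root d' z s) :
    ∀ z s, Root d' z s ↔ Root d z s := by
  intro z s
  constructor
  · intro h
    have hz : (d.get? z).isSome := (hkeys z).mp (root_isSome d' z s h)
    obtain ⟨t, ht⟩ := forest_total d hF z hz
    have := fwd z t ht
    exact root_unique d' z s t h this ▸ ht
  · exact fwd z s

-- Path-compression insert x ↦ r (r the root of x) preserves the forest and all roots.
theorem root_insert_compress (d : PySem.Dict Int Int) (x r : Int)
    (hF : Forest d) (hxr : Root d x r) :
    Forest (d.insert x r) ∧ (∀ z s, Root d z s → Root (d.insert x r) z s) := by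
  obtain ⟨hc, h, hm⟩ := hF
  obtain ⟨f0, hf0⟩ := hxr
  have hxr : Root d x r := ⟨f0, hf0⟩
  have hrr : d.get? r = some r := root_self d f0 x r hf0
  have hget : ∀ z, (d.insert x r).get? z = if z = x then some r else d.get? z := by
    intro z; exact PySem.Dict.get?_insert d x z r
  have hroot' : Root (d.insert x r) x r := by
    by_cases hrx : r = x
    · subst hrx; exact root_of_self _ r (by rw [hget]; simp)
    · refine ⟨2, ?_⟩
      simp only [rootAux, hget]
      simp [hrx, hrr]
  refine ⟨⟨?_, ⟨h, ?_⟩⟩, ?_⟩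
  · intro z p hz
    rw [hget] at hz
    rw [hget]
    by_cases hzx : z = x
    · simp [hzx] at hz
      by_cases hpx : p = x
      · simp [hpx]
      · simp [← hz, hrr]
    · simp [if_neg hzx] at hz
      by_cases hpx : p = x
      · simp [hpx]
      · simp [if_neg hpx]; exact hc z p hz
  · intro z p hz hpz
    rw [hget] at hz
    by_cases hzx : z = x
    · have hpr : p = r := by rw [if_pos hzx] at hz; exact (Option.some.inj hz).symm
      subst hpr
      rcases root_h_lt d h hm f0 x p hf0 with heq | hlt
      · exact absurd (heq.trans hzx.symm) hpz
      · rw [hzx]; exact hlt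
    · simp [if_neg hzx] at hz
      exact hm z p hz hpz
  · suffices H : ∀ f z s, rootAux d f z = some s → Root (d.insert x r) z s by
      intro z s hs; obtain ⟨f, hf⟩ := hs; exact H f z s hf
    intro f
    induction f with
    | zero => intro z s hz; simp [rootAux] at hz
    | succ f ih =>
      intro z s hz
      simp only [rootAux] at hz
      cases hgz : d.get? z with
      | none => simp [hgz] at hz
      | some p =>
        simp only [hgz] at hz
        by_cases hzx : z = x
        · subst hzx
          have : s = r := root_unique d z s r ⟨f + 1, by simp [rootAux, hgz, hz]⟩ hxr
          subst this
          exact hroot'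
        · by_cases hpz : p = z
          · rw [if_pos hpz] at hz
            obtain rfl : z = s := Option.some.inj hz
            exact root_of_self _ z (by rw [hget, if_neg hzx, hgz, hpz])
          · simp only [if_neg hpz] at hz
            exact root_step _ z p s (by rw [hget]; simp [if_neg hzx, hgz]) hpz (ih p s hz)

-- Inserting a fresh self-loop a ↦ a preserves the forest and all roots.
theorem root_insert_fresh (d : PySem.Dict Int Int) (a : Int)
    (hF : Forest d) (ha : d.get? a = none) :
    Forest (d.insert a a) ∧ (∀ z s, Root d z s → Root (d.insert a a) z s) ∧
      Root (d.insert a a) a a := by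
  obtain ⟨hc, h, hm⟩ := hF
  have hget : ∀ z, (d.insert a a).get? z = if z = a then some a else d.get? z := by
    intro z; exact PySem.Dict.get?_insert d a z a
  have hnota : ∀ z p, d.get? z = some p → z ≠ a := by
    intro z p hz hza; rw [hza, ha] at hz; cases hz
  have hnotp : ∀ z p, d.get? z = some p → p ≠ a := by
    intro z p hz hpa
    have := hc z p hz
    rw [hpa, ha] at this; simp at this
  refine ⟨⟨?_, ⟨h, ?_⟩⟩, ?_, root_of_self _ a (by rw [hget]; simp)⟩
  · intro z p hz
    rw [hget] at hz
    rw [hget]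
    by_cases hza : z = a
    · simp [hza] at hz; simp [← hz]
    · rw [if_neg hza] at hz
      rw [if_neg (hnotp z p hz)]
      exact hc z p hz
  · intro z p hz hpz
    rw [hget] at hz
    by_cases hza : z = a
    · rw [if_pos hza] at hz
      exact absurd ((Option.some.inj hz).symm.trans hza.symm) hpz
    · rw [if_neg hza] at hz
      exact hm z p hz hpz
  · suffices H : ∀ f z s, rootAux d f z = some s → Root (d.insert a a) z s by
      intro z s hs; obtain ⟨f, hf⟩ := hs; exact H f z s hf
    intro f
    induction f with
    | zero => intro z s hz; simp [rootAux] at hz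
    | succ f ih =>
      intro z s hz
      simp only [rootAux] at hz
      cases hgz : d.get? z with
      | none => simp [hgz] at hz
      | some p =>
        simp only [hgz] at hz
        have hza := hnota z p hgz
        by_cases hpz : p = z
        · rw [if_pos hpz] at hz
          obtain rfl : z = s := Option.some.inj hz
          exact root_of_self _ z (by rw [hget, if_neg hza, hgz, hpz])
        · rw [if_neg hpz] at hz
          exact root_step _ z p s (by rw [hget, if_neg hza, hgz]) hpz (ih p s hz)

-- Linking root ra under root rb (ra ≠ rb) merges the two classes.
theorem root_insert_edge (d : PySem.Dict Int Int) (ra rb : Int)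
    (hF : Forest d) (hra : d.get? ra = some ra) (hrb : d.get? rb = some rb)
    (hne : ra ≠ rb) :
    Forest (d.insert ra rb) ∧
      (∀ z s, Root d z s → Root (d.insert ra rb) z (if s = ra then rb else s)) := by
  obtain ⟨hc, h, hm⟩ := hF
  have hget : ∀ z, (d.insert ra rb).get? z = if z = ra then some rb else d.get? z := by
    intro z; exact PySem.Dict.get?_insert d ra z rb
  have hrootb : Root (d.insert ra rb) rb rb :=
    root_of_self _ rb (by rw [hget, if_neg (Ne.symm hne), hrb])
  have hroota : Root (d.insert ra rb) ra rb :=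
    root_step _ ra rb rb (by rw [hget, if_pos rfl]) (Ne.symm hne) hrootb
  refine ⟨⟨?_, ?_⟩, ?_⟩
  · intro z p hz
    rw [hget] at hz
    rw [hget]
    by_cases hza : z = ra
    · rw [if_pos hza] at hz
      obtain rfl : rb = p := Option.some.inj hz
      rw [if_neg (Ne.symm hne), hrb]; simp
    · rw [if_neg hza] at hz
      by_cases hpa : p = ra
      · simp [hpa]
      · rw [if_neg hpa]; exact hc z p hz
  · refine ⟨fun z => if z = rb then 0 else h z + 1, ?_⟩
    intro z p hz hpz
    beta_reduce
    rw [hget] at hz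
    by_cases hza : z = ra
    · rw [if_pos hza] at hz
      obtain rfl : rb = p := Option.some.inj hz
      have hzb : z ≠ rb := by rw [hza]; exact hne
      simp [if_neg hzb]
    · rw [if_neg hza] at hz
      have hzb : z ≠ rb := by
        intro hzz
        rw [hzz, hrb] at hz
        exact hpz ((Option.some.inj hz).symm.trans hzz.symm)
      rw [if_neg hzb]
      by_cases hpb : p = rb
      · simp [hpb]
      · rw [if_neg hpb]
        exact Nat.add_lt_add_right (hm z p hz hpz) 1
  · suffices H : ∀ f z s, rootAux d f z = some s →
        Root (d.insert ra rb) z (if s = ra then rb else s) by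
      intro z s hs; obtain ⟨f, hf⟩ := hs; exact H f z s hf
    intro f
    induction f with
    | zero => intro z s hz; simp [rootAux] at hz
    | succ f ih =>
      intro z s hz
      simp only [rootAux] at hz
      cases hgz : d.get? z with
      | none => simp [hgz] at hz
      | some p =>
        simp only [hgz] at hz
        by_cases hza : z = ra
        · have : s = ra := by
            refine root_unique d z s ra ⟨f + 1, by simp [rootAux, hgz, hz]⟩ ?_
            rw [hza]; exact ⟨1, by simp [rootAux, hra]⟩
          rw [this, if_pos rfl, hza]
          exact hroota
        · by_cases hpz : p = z
          · rw [if_pos hpz] at hz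
            obtain rfl : z = s := Option.some.inj hz
            rw [if_neg (by exact hza)]
            exact root_of_self _ z (by rw [hget, if_neg hza, hgz, hpz])
          · rw [if_neg hpz] at hz
            exact root_step _ z p _ (by rw [hget, if_neg hza, hgz]) hpz (ih p s hz)

-- findA with sufficient fuel returns the root and only compresses paths:
-- keys unchanged (as a list), forest preserved, every root preserved.
theorem findA_spec : ∀ (f : Nat) (d : PySem.Dict Int Int) (x r : Int), Forest d →
    rootAux d f x = some r →
    (findA f d x).1 = r ∧ Forest (findA f d x).2 ∧ (findA f d x).2.keys = d.keys ∧
    (∀ z s, Root d z s → Root (findA f d x).2 z s) := by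
  intro f
  induction f with
  | zero => intro d x r hF hr; simp [rootAux] at hr
  | succ f ih =>
    intro d x r hF hr
    simp only [rootAux] at hr
    cases hx : d.get? x with
    | none => simp [hx] at hr
    | some p =>
      simp only [hx] at hr
      by_cases hpx : p = x
      · rw [if_pos hpx] at hr
        obtain rfl : x = r := Option.some.inj hr
        have hfind : findA (f + 1) d x = (x, d) := by simp [findA, hx, hpx]
        rw [hfind]
        exact ⟨rfl, hF, rfl, fun z s hs => hs⟩
      · rw [if_neg hpx] at hr
        obtain ⟨h1, h2, h3, h4⟩ := ih d p r hF hr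
        have hxr : Root (findA f d p).2 x r := by
          refine h4 x r ?_
          exact root_step d x p r hx hpx ⟨f, hr⟩
        obtain ⟨hF', htr⟩ := root_insert_compress (findA f d p).2 x r h2 hxr
        have hkeys : ((findA f d p).2.insert x r).keys = (findA f d p).2.keys := by
          apply PySem.Dict.keys_insert_of_contains
          rw [PySem.Dict.contains_eq_isSome_get?]
          exact root_isSome _ x r hxr
        have hfind : findA (f + 1) d x =
            ((findA f d p).1, (findA f d p).2.insert x (findA f d p).1) := by
          simp [findA, hx, hpx]
        rw [hfind, h1]
        exact ⟨rfl, hF', by rw [show ((findA f d p).2.insert x r).keys = _ from hkeys, h3],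
          fun z s hs => htr z s (h4 z s hs)⟩

theorem isSome_iff_mem_keys (d : PySem.Dict Int Int) (x : Int) :
    (d.get? x).isSome ↔ x ∈ d.keys := by
  rw [Option.isSome_iff_ne_none]
  constructor
  · intro h
    by_contra hm
    exact h ((PySem.Dict.get?_eq_none_iff_not_mem_keys d x).mpr hm)
  · intro h hn
    exact (PySem.Dict.get?_eq_none_iff_not_mem_keys d x).mp hn h

-- The root map after freshening a and b: old roots, plus fresh nodes self-rooted.
def Root2 (d : PySem.Dict Int Int) (a b z s : Int) : Prop :=
  Root d z s ∨ (d.get? z = none ∧ (z = a ∨ z = b) ∧ s = z)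

theorem union_spec (d : PySem.Dict Int Int) (a b : Int) (hF : Forest d)
    (hnd : d.keys.Nodup) :
    ∃ Ra Rb, Root2 d a b a Ra ∧ Root2 d a b b Rb ∧
      Forest (unionA d a b) ∧ (unionA d a b).keys.Nodup ∧
      (∀ z, ((unionA d a b).get? z).isSome ↔ (d.get? z).isSome ∨ z = a ∨ z = b) ∧
      (∀ z s, Root2 d a b z s → Root (unionA d a b) z (if s = Ra then Rb else s)) := by
  -- stage 1: freshen a
  set d1 := if d.contains a then d else d.insert a a with hd1
  have stage1 : Forest d1 ∧ d1.keys.Nodup ∧ (∀ z s, Root d z s → Root d1 z s) ∧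
      (∀ z, (d1.get? z).isSome ↔ (d.get? z).isSome ∨ z = a) ∧
      (d.get? a = none → Root d1 a a) := by
    cases hca : d.contains a with
    | true =>
      have hsome : (d.get? a).isSome := by
        rw [← PySem.Dict.contains_eq_isSome_get?, hca]
      refine ⟨by rw [hd1, if_pos hca]; exact hF, by rw [hd1, if_pos hca]; exact hnd,
        by rw [hd1, if_pos hca]; exact fun z s h => h, ?_, ?_⟩
      · intro z
        rw [hd1, if_pos hca]
        constructor
        · exact Or.inl
        · rintro (h | rfl)
          · exact h
          · exact hsome
      · intro hnone; rw [hnone] at hsome; simp at hsome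
    | false =>
      have hnone : d.get? a = none := by
        have := PySem.Dict.contains_eq_isSome_get? (d := d) (k := a)
        rw [hca] at this
        exact Option.not_isSome_iff_eq_none.mp (by rw [← this]; simp)
      obtain ⟨hF1, htr1, hra1⟩ := root_insert_fresh d a hF hnone
      have hget1 : ∀ z, (d.insert a a).get? z = if z = a then some a else d.get? z :=
        fun z => PySem.Dict.get?_insert d a z a
      refine ⟨by rw [hd1, if_neg (by simp [hca])]; exact hF1,
        by rw [hd1, if_neg (by simp [hca])]; exact PySem.Dict.nodup_keys_insert _ _ _ hnd,
        by rw [hd1, if_neg (by simp [hca])]; exact htr1, ?_, ?_⟩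
      · intro z
        rw [hd1, if_neg (by simp [hca]), hget1 z]
        by_cases hza : z = a <;> simp [hza]
      · intro _; rw [hd1, if_neg (by simp [hca])]; exact hra1
  obtain ⟨hF1, hnd1, htr1, hkeys1, hfresh1⟩ := stage1
  -- stage 2: freshen b
  set d2 := if d1.contains b then d1 else d1.insert b b with hd2
  have stage2 : Forest d2 ∧ d2.keys.Nodup ∧ (∀ z s, Root d1 z s → Root d2 z s) ∧
      (∀ z, (d2.get? z).isSome ↔ (d1.get? z).isSome ∨ z = b) ∧
      (d1.get? b = none → Root d2 b b) := by
    cases hcb : d1.contains b with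
    | true =>
      have hsome : (d1.get? b).isSome := by
        rw [← PySem.Dict.contains_eq_isSome_get?, hcb]
      refine ⟨by rw [hd2, if_pos hcb]; exact hF1, by rw [hd2, if_pos hcb]; exact hnd1,
        by rw [hd2, if_pos hcb]; exact fun z s h => h, ?_, ?_⟩
      · intro z
        rw [hd2, if_pos hcb]
        constructor
        · exact Or.inl
        · rintro (h | rfl)
          · exact h
          · exact hsome
      · intro hnone; rw [hnone] at hsome; simp at hsome
    | false =>
      have hnone : d1.get? b = none := by
        have := PySem.Dict.contains_eq_isSome_get? (d := d1) (k := b)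
        rw [hcb] at this
        exact Option.not_isSome_iff_eq_none.mp (by rw [← this]; simp)
      obtain ⟨hF2, htr2, hrb2⟩ := root_insert_fresh d1 b hF1 hnone
      have hget2 : ∀ z, (d1.insert b b).get? z = if z = b then some b else d1.get? z :=
        fun z => PySem.Dict.get?_insert d1 b z b
      refine ⟨by rw [hd2, if_neg (by simp [hcb])]; exact hF2,
        by rw [hd2, if_neg (by simp [hcb])]; exact PySem.Dict.nodup_keys_insert _ _ _ hnd1,
        by rw [hd2, if_neg (by simp [hcb])]; exact htr2, ?_, ?_⟩
      · intro z
        rw [hd2, if_neg (by simp [hcb]), hget2 z]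
        by_cases hzb : z = b <;> simp [hzb]
      · intro _; rw [hd2, if_neg (by simp [hcb])]; exact hrb2
  obtain ⟨hF2, hnd2, htr2, hkeys2, hfresh2⟩ := stage2
  -- roots of a and b in d2
  have hsome2a : (d2.get? a).isSome := by rw [hkeys2, hkeys1]; tauto
  have hsome2b : (d2.get? b).isSome := by rw [hkeys2]; tauto
  obtain ⟨Ra, hRa2⟩ := forest_total d2 hF2 a hsome2a
  obtain ⟨Rb, hRb2⟩ := forest_total d2 hF2 b hsome2b
  -- Root2 facts for a and b
  have hR2a : Root2 d a b a Ra := by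
    cases hga : d.get? a with
    | some p =>
      obtain ⟨t, ht⟩ := forest_total d hF a (by rw [hga]; simp)
      have : t = Ra := root_unique d2 a t Ra (htr2 _ _ (htr1 _ _ ht)) hRa2
      exact Or.inl (this ▸ ht)
    | none =>
      have := htr2 _ _ (hfresh1 hga)
      have : a = Ra := root_unique d2 a a Ra this hRa2
      exact Or.inr ⟨hga, Or.inl rfl, this.symm⟩
  have hR2b : Root2 d a b b Rb := by
    cases hgb : d.get? b with
    | some p =>
      obtain ⟨t, ht⟩ := forest_total d hF b (by rw [hgb]; simp)
      have : t = Rb := root_unique d2 b t Rb (htr2 _ _ (htr1 _ _ ht)) hRb2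
      exact Or.inl (this ▸ ht)
    | none =>
      have hb2 : Root d2 b b := by
        cases hgb1 : d1.get? b with
        | none => exact hfresh2 hgb1
        | some q =>
          have hzb : (d1.get? b).isSome := by rw [hgb1]; simp
          rw [hkeys1] at hzb
          rcases hzb with h | rfl
          · rw [hgb] at h; simp at h
          · exact htr2 _ _ (hfresh1 hgb)
      have : b = Rb := root_unique d2 b b Rb hb2 hRb2
      exact Or.inr ⟨hgb, Or.inr rfl, this.symm⟩
  -- stage 3: find a (path compression)
  obtain ⟨fa, hfa⟩ := hRa2
  have hfa' : rootAux d2 d2.size a = some Ra := rootAux_size d2 hF2 fa a Ra hfa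
  set fr1 := findA d2.size d2 a with hfr1
  obtain ⟨hr1, hF3, hk3, htr3⟩ := findA_spec d2.size d2 a Ra hF2 hfa'
  have hnd3 : fr1.2.keys.Nodup := by rw [hk3]; exact hnd2
  -- stage 4: find b
  have hRb3 : Root fr1.2 b Rb := htr3 _ _ hRb2
  obtain ⟨fb, hfb⟩ := hRb3
  have hfb' : rootAux fr1.2 fr1.2.size b = some Rb := rootAux_size fr1.2 hF3 fb b Rb hfb
  set fr2 := findA fr1.2.size fr1.2 b with hfr2
  obtain ⟨hr2, hF4, hk4, htr4⟩ := findA_spec fr1.2.size fr1.2 b Rb hF3 hfb'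
  have hnd4 : fr2.2.keys.Nodup := by rw [hk4]; exact hnd3
  -- combined transport into d4 = fr2.2
  have htr24 : ∀ z s, Root d2 z s → Root fr2.2 z s := fun z s h => htr4 _ _ (htr3 _ _ h)
  have htrAll : ∀ z s, Root2 d a b z s → Root fr2.2 z s := by
    intro z s h2
    rcases h2 with h | ⟨hgz, hzab, hsz⟩
    · exact htr24 _ _ (htr2 _ _ (htr1 _ _ h))
    · rcases hzab with hza | hzb
      · rw [hsz, hza]
        rw [hza] at hgz
        exact htr24 _ _ (htr2 _ _ (hfresh1 hgz))
      · rw [hsz, hzb]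
        rw [hzb] at hgz
        cases hgb1 : d1.get? b with
        | none => exact htr24 _ _ (hfresh2 hgb1)
        | some q =>
          have hzb2 : (d1.get? b).isSome := by rw [hgb1]; simp
          rw [hkeys1] at hzb2
          rcases hzb2 with hsome | hza2
          · rw [hgz] at hsome; simp at hsome
          · rw [hza2]
            rw [hza2] at hgz
            exact htr24 _ _ (htr2 _ _ (hfresh1 hgz))
  have hRa4 : Root fr2.2 a Ra := htr24 _ _ ⟨fa, hfa⟩
  have hRb4 : Root fr2.2 b Rb := htr4 _ _ ⟨fb, hfb⟩
  have hga4 : fr2.2.get? Ra = some Ra := by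
    obtain ⟨f, hf⟩ := hRa4; exact root_self _ f a Ra hf
  have hgb4 : fr2.2.get? Rb = some Rb := by
    obtain ⟨f, hf⟩ := hRb4; exact root_self _ f b Rb hf
  -- final: insert Ra ↦ Rb
  have hun : unionA d a b = fr2.2.insert fr1.1 fr2.1 := rfl
  rw [hun, hr1, hr2]
  have hkeysfin : (fr2.2.insert Ra Rb).keys = fr2.2.keys := by
    apply PySem.Dict.keys_insert_of_contains
    rw [PySem.Dict.contains_eq_isSome_get?, hga4]; rfl
  have hkeysiff : ∀ z, ((fr2.2.insert Ra Rb).get? z).isSome ↔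
      (d.get? z).isSome ∨ z = a ∨ z = b := by
    intro z
    rw [isSome_iff_mem_keys, hkeysfin, ← isSome_iff_mem_keys]
    have : (fr2.2.get? z).isSome ↔ (d2.get? z).isSome := by
      rw [isSome_iff_mem_keys, isSome_iff_mem_keys, hk4, hk3]
    rw [this, hkeys2, hkeys1, or_assoc]
  refine ⟨Ra, Rb, hR2a, hR2b, ?_, ?_, hkeysiff, ?_⟩
  · -- Forest
    by_cases hab : Ra = Rb
    · -- no-op insert: lookups unchanged
      have hpt : ∀ z, ((fr2.2.insert Ra Rb).get? z) = fr2.2.get? z := by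
        intro z
        rw [PySem.Dict.get?_insert]
        by_cases hza : z = Ra
        · rw [if_pos hza, hza, hga4, hab]
        · rw [if_neg hza]
      obtain ⟨hc4, hh4⟩ := hF4
      exact ⟨fun x p hxp => by rw [hpt] at hxp ⊢; exact hc4 x p hxp,
        by obtain ⟨h4, hm4⟩ := hh4
           exact ⟨h4, fun x p hxp => by rw [hpt] at hxp; exact hm4 x p hxp⟩⟩
    · exact (root_insert_edge fr2.2 Ra Rb hF4 hga4 hgb4 hab).1
  · rw [hkeysfin]; exact hnd4
  · -- transports
    intro z s h2
    have h4 : Root fr2.2 z s := htrAll z s h2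
    by_cases hab : Ra = Rb
    · have hpt : ∀ z, ((fr2.2.insert Ra Rb).get? z) = fr2.2.get? z := by
        intro z
        rw [PySem.Dict.get?_insert]
        by_cases hza : z = Ra
        · rw [if_pos hza, hza, hga4, hab]
        · rw [if_neg hza]
      have hcongr := rootAux_congr (fr2.2) (fr2.2.insert Ra Rb) hpt
      have hite : (if s = Ra then Rb else s) = s := by
        by_cases hsa : s = Ra
        · rw [if_pos hsa, hsa, hab]
        · rw [if_neg hsa]
      rw [hite]
      obtain ⟨f, hf⟩ := h4
      exact ⟨f, by rw [hcongr f z]; exact hf⟩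
    · exact (root_insert_edge fr2.2 Ra Rb hF4 hga4 hgb4 hab).2 z s h4

-- Characterization of B's inner loop: merged collects {a,b} plus all touched
-- components, rest keeps the untouched ones in order.
theorem bfold_spec (a b : Int) :
    ∀ (comps : List (PySem.Set Int)) (m : PySem.Set Int) (acc : List (PySem.Set Int)),
    (∀ z, z ∈ (comps.foldl (fun (p : PySem.Set Int × List (PySem.Set Int)) c =>
        if a ∈ c ∨ b ∈ c then (PySem.Set.union p.1 c, p.2) else (p.1, p.2 ++ [c]))
        (m, acc)).1 ↔ z ∈ m ∨ ∃ c ∈ comps, (a ∈ c ∨ b ∈ c) ∧ z ∈ c) ∧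
    (comps.foldl (fun (p : PySem.Set Int × List (PySem.Set Int)) c =>
        if a ∈ c ∨ b ∈ c then (PySem.Set.union p.1 c, p.2) else (p.1, p.2 ++ [c]))
        (m, acc)).2 = acc ++ comps.filter (fun c => !(decide (a ∈ c ∨ b ∈ c))) := by
  intro comps
  induction comps with
  | nil => intro m acc; simp
  | cons c cs ih =>
    intro m acc
    by_cases hc : a ∈ c ∨ b ∈ c
    · simp only [List.foldl_cons, if_pos hc]
      obtain ⟨ih1, ih2⟩ := ih (PySem.Set.union m c) acc
      constructor
      · intro z
        rw [ih1 z, PySem.Set.mem_union]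
        constructor
        · rintro ((h | h) | ⟨c', hc', h⟩)
          · exact Or.inl h
          · exact Or.inr ⟨c, List.mem_cons_self .., hc, h⟩
          · exact Or.inr ⟨c', List.mem_cons_of_mem c hc', h⟩
        · rintro (h | ⟨c', hc', hor, h⟩)
          · exact Or.inl (Or.inl h)
          · rcases List.mem_cons.mp hc' with rfl | hc'
            · exact Or.inl (Or.inr h)
            · exact Or.inr ⟨c', hc', hor, h⟩
      · rw [ih2, List.filter_cons, if_neg (by simp [hc])]
    · simp only [List.foldl_cons, if_neg hc]
      obtain ⟨ih1, ih2⟩ := ih m (acc ++ [c])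
      constructor
      · intro z
        rw [ih1 z]
        constructor
        · rintro (h | ⟨c', hc', h⟩)
          · exact Or.inl h
          · exact Or.inr ⟨c', List.mem_cons_of_mem c hc', h⟩
        · rintro (h | ⟨c', hc', hor, h⟩)
          · exact Or.inl h
          · rcases List.mem_cons.mp hc' with rfl | hc'
            · exact absurd hor hc
            · exact Or.inr ⟨c', hc', hor, h⟩
      · rw [ih2, List.filter_cons, if_pos (by simp [hc]), List.append_assoc,
          List.singleton_append]

theorem forall2_filter_iff {α β : Type} {R : α → β → Prop} {p : α → Bool} {q : β → Bool} :
    ∀ {l1 : List α} {l2 : List β}, List.Forall₂ R l1 l2 → (∀ x y, R x y → p x = q y) →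
    List.Forall₂ R (l1.filter p) (l2.filter q) := by
  intro l1 l2 h hpq
  induction h with
  | nil => simp
  | @cons x y l1' l2' hR htail ih =>
    rw [List.filter_cons, List.filter_cons, ← hpq x y hR]
    cases hpx : p x with
    | true => simp only [if_true]; exact List.Forall₂.cons hR ih
    | false => simpa using ih

theorem forall2_exists_iff {α β : Type} {R : α → β → Prop} {φ : α → Prop} {ψ : β → Prop} :
    ∀ {l1 : List α} {l2 : List β}, List.Forall₂ R l1 l2 → (∀ x y, R x y → (φ x ↔ ψ y)) →
    ((∃ x ∈ l1, φ x) ↔ (∃ y ∈ l2, ψ y)) := by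
  intro l1 l2 h hpq
  induction h with
  | nil => simp
  | @cons x y l1' l2' hR htail ih =>
    simp only [List.mem_cons]
    constructor
    · rintro ⟨x', hx', hφ⟩
      rcases hx' with rfl | hx'
      · exact ⟨y, Or.inl rfl, (hpq x' y hR).mp hφ⟩
      · obtain ⟨y', hy', hψ⟩ := ih.mp ⟨x', hx', hφ⟩
        exact ⟨y', Or.inr hy', hψ⟩
    · rintro ⟨y', hy', hψ⟩
      rcases hy' with rfl | hy'
      · exact ⟨x, Or.inl rfl, (hpq x y' hR).mpr hψ⟩
      · obtain ⟨x', hx', hφ⟩ := ih.mpr ⟨y', hy', hψ⟩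
        exact ⟨x', Or.inr hx', hφ⟩

theorem forall2_imp_mem {α β : Type} {R R' : α → β → Prop} :
    ∀ {l1 : List α} {l2 : List β}, List.Forall₂ R l1 l2 →
    (∀ x y, R x y → y ∈ l2 → R' x y) → List.Forall₂ R' l1 l2 := by
  intro l1 l2 h
  induction h with
  | nil => intro _; exact List.Forall₂.nil
  | @cons x y l1' l2' hR htail ih =>
    intro himp
    exact List.Forall₂.cons (himp x y hR (List.mem_cons_self ..))
      (ih fun x' y' h' hy' => himp x' y' h' (List.mem_cons_of_mem y hy'))

theorem forall2_mem_right {α β : Type} {R : α → β → Prop} :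
    ∀ {l1 : List α} {l2 : List β}, List.Forall₂ R l1 l2 → ∀ y ∈ l2, ∃ x ∈ l1, R x y := by
  intro l1 l2 h
  induction h with
  | nil => intro y hy; simp at hy
  | @cons x y l1' l2' hR htail ih =>
    intro y' hy'
    rcases List.mem_cons.mp hy' with rfl | hy'
    · exact ⟨x, List.mem_cons_self .., hR⟩
    · obtain ⟨x', hx', hR'⟩ := ih y' hy'
      exact ⟨x', List.mem_cons_of_mem x hx', hR'⟩

theorem pv_forall2_append {α β : Type} {R : α → β → Prop} :
    ∀ {l1 : List α} {l2 : List β} {l3 : List α} {l4 : List β},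
    List.Forall₂ R l1 l2 → List.Forall₂ R l3 l4 → List.Forall₂ R (l1 ++ l3) (l2 ++ l4) := by
  intro l1 l2 l3 l4 h h34
  induction h with
  | nil => simpa using h34
  | @cons x y l1' l2' hR htail ih => exact List.Forall₂.cons hR ih

-- c is exactly the Root-class of representative r.
def PVCompRel (d : PySem.Dict Int Int) (c : PySem.Set Int) (r : Int) : Prop :=
  Root d r r ∧ ∀ z, z ∈ c ↔ Root d z r

-- The joint invariant between A's union-find dict and B's component list.
def INVR (d : PySem.Dict Int Int) (comps : List (PySem.Set Int)) (rs : List Int) : Prop :=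
  List.Forall₂ (PVCompRel d) comps rs ∧ rs.Nodup ∧
    ∀ z, (d.get? z).isSome → ∃ r, r ∈ rs ∧ Root d z r

-- One stone: A's union and B's merge step preserve the joint invariant.
theorem step_inv (d : PySem.Dict Int Int) (comps : List (PySem.Set Int)) (rs : List Int)
    (a b : Int) (hF : Forest d) (hnd : d.keys.Nodup) (hinv : INVR d comps rs) :
    ∃ rs', Forest (unionA d a b) ∧ (unionA d a b).keys.Nodup ∧
      INVR (unionA d a b) (bStep comps a b) rs' := by
  obtain ⟨hfa, hrsnd, hcov⟩ := hinv
  obtain ⟨Ra, Rb, hR2a, hR2b, hF', hnd', hkeys', htr'⟩ := union_spec d a b hF hnd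
  -- facts about Ra / Rb versus d
  have hRaFact : ((d.get? a).isSome ∧ Root d a Ra) ∨ (d.get? a = none ∧ Ra = a) := by
    rcases hR2a with h | ⟨hn, _, hs⟩
    · exact Or.inl ⟨root_isSome d a Ra h, h⟩
    · exact Or.inr ⟨hn, hs⟩
  have hRbFact : ((d.get? b).isSome ∧ Root d b Rb) ∨ (d.get? b = none ∧ Rb = b) := by
    rcases hR2b with h | ⟨hn, _, hs⟩
    · exact Or.inl ⟨root_isSome d b Rb h, h⟩
    · exact Or.inr ⟨hn, hs⟩
  -- per-pair membership characterizations
  have fact1 : ∀ c r, PVCompRel d c r → (a ∈ c ↔ ((d.get? a).isSome ∧ r = Ra)) := by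
    intro c r ⟨hrr, hmem⟩
    rw [hmem a]
    constructor
    · intro h
      refine ⟨root_isSome d a r h, ?_⟩
      rcases hRaFact with ⟨_, hroot⟩ | ⟨hn, _⟩
      · exact root_unique d a r Ra h hroot
      · exact absurd (root_isSome d a r h) (by simp [hn])
    · rintro ⟨hsome, rfl⟩
      rcases hRaFact with ⟨_, hroot⟩ | ⟨hn, _⟩
      · exact hroot
      · rw [hn] at hsome; simp at hsome
  have fact2 : ∀ c r, PVCompRel d c r → (b ∈ c ↔ ((d.get? b).isSome ∧ r = Rb)) := by
    intro c r ⟨hrr, hmem⟩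
    rw [hmem b]
    constructor
    · intro h
      refine ⟨root_isSome d b r h, ?_⟩
      rcases hRbFact with ⟨_, hroot⟩ | ⟨hn, _⟩
      · exact root_unique d b r Rb h hroot
      · exact absurd (root_isSome d b r h) (by simp [hn])
    · rintro ⟨hsome, rfl⟩
      rcases hRbFact with ⟨_, hroot⟩ | ⟨hn, _⟩
      · exact hroot
      · rw [hn] at hsome; simp at hsome
  -- rs representatives are old keys
  have hrs_isSome : ∀ r ∈ rs, (d.get? r).isSome := by
    intro r hr
    obtain ⟨c, _, hrel⟩ := forall2_mem_right hfa r hr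
    exact root_isSome d r r hrel.1
  -- backward characterization of roots in d'
  have hchar : ∀ z s', Root (unionA d a b) z s' ↔
      ∃ s, Root2 d a b z s ∧ s' = (if s = Ra then Rb else s) := by
    intro z s'
    constructor
    · intro h
      have hz := root_isSome _ z s' h
      rcases (hkeys' z).mp hz with hsome | hza | hzb
      · obtain ⟨s, hs⟩ := forest_total d hF z hsome
        exact ⟨s, Or.inl hs, root_unique _ z s' _ h (htr' z s (Or.inl hs))⟩
      · subst hza
        exact ⟨Ra, hR2a, root_unique _ z s' _ h (htr' z Ra hR2a)⟩
      · subst hzb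
        exact ⟨Rb, hR2b, root_unique _ z s' _ h (htr' z Rb hR2b)⟩
    · rintro ⟨s, h2, rfl⟩
      exact htr' z s h2
  have hiteRb : (if Rb = Ra then Rb else Rb) = Rb := by
    by_cases h : Rb = Ra <;> simp [h]
  have hRb' : Root (unionA d a b) b Rb := by
    have := htr' b Rb hR2b
    rwa [show (if Rb = Ra then Rb else Rb) = Rb from hiteRb] at this
  have hRbroot' : Root (unionA d a b) Rb Rb := by
    obtain ⟨f, hf⟩ := hRb'
    exact root_of_self _ Rb (root_self _ f b Rb hf)
  -- the filters
  set q : Int → Bool := fun r =>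
    !(decide (((d.get? a).isSome ∧ r = Ra) ∨ ((d.get? b).isSome ∧ r = Rb))) with hq
  have hpq : ∀ c r, PVCompRel d c r →
      (fun c => !(decide (a ∈ c ∨ b ∈ c))) c = q r := by
    intro c r hrel
    rw [hq]
    simp only [Bool.not_inj_iff, decide_eq_decide]
    rw [fact1 c r hrel, fact2 c r hrel]
  -- q r implies r differs from both Ra and Rb (for r a representative)
  have hqne : ∀ r, (d.get? r).isSome → q r = true → r ≠ Ra ∧ r ≠ Rb := by
    intro r hsome hqr
    rw [hq] at hqr
    simp only [Bool.not_eq_true', decide_eq_false_iff_not, not_or, not_and] at hqr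
    constructor
    · intro hra
      rcases hRaFact with ⟨ha, _⟩ | ⟨hn, heq⟩
      · exact hqr.1 ha hra
      · rw [hra, heq, hn] at hsome; simp at hsome
    · intro hrb
      rcases hRbFact with ⟨hb, _⟩ | ⟨hn, heq⟩
      · exact hqr.2 hb hrb
      · rw [hrb, heq, hn] at hsome; simp at hsome
  -- unchanged classes carry over to d'
  have hkeep : ∀ c r, PVCompRel d c r → r ∈ rs.filter q → PVCompRel (unionA d a b) c r := by
    intro c r hrel hmem
    have hqr : q r = true := List.of_mem_filter hmem
    have hrsome : (d.get? r).isSome := root_isSome d r r hrel.1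
    obtain ⟨hra, hrb⟩ := hqne r hrsome hqr
    have hroot' : Root (unionA d a b) r r := by
      have := htr' r r (Or.inl hrel.1)
      rwa [if_neg hra] at this
    refine ⟨hroot', ?_⟩
    intro z
    rw [hrel.2 z]
    constructor
    · intro h
      have := htr' z r (Or.inl h)
      rwa [if_neg hra] at this
    · intro h
      obtain ⟨s, h2, hite⟩ := (hchar z r).mp h
      have hs : s = r := by
        by_cases hsa : s = Ra
        · rw [if_pos hsa] at hite; exact absurd hite hrb
        · rw [if_neg hsa] at hite; exact hite.symm
      subst hs
      rcases h2 with h2 | ⟨hn, _, hsz⟩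
      · exact h2
      · rw [hsz, hn] at hrsome; simp at hrsome
  -- shape of bStep
  obtain ⟨hm1, hm2⟩ := bfold_spec a b comps (PySem.Set.ofList [a, b]) []
  have hbstep : bStep comps a b =
      comps.filter (fun c => !(decide (a ∈ c ∨ b ∈ c))) ++
      [(comps.foldl (fun (p : PySem.Set Int × List (PySem.Set Int)) c =>
        if a ∈ c ∨ b ∈ c then (PySem.Set.union p.1 c, p.2) else (p.1, p.2 ++ [c]))
        (PySem.Set.ofList [a, b], [])).1] := by
    simp only [bStep]
    rw [hm2]
    simp
  -- membership in merged
  have hmerged : ∀ z, z ∈ (comps.foldl (fun (p : PySem.Set Int × List (PySem.Set Int)) c =>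
      if a ∈ c ∨ b ∈ c then (PySem.Set.union p.1 c, p.2) else (p.1, p.2 ++ [c]))
      (PySem.Set.ofList [a, b], [])).1 ↔ Root (unionA d a b) z Rb := by
    intro z
    rw [hm1 z]
    have hexists : (∃ c ∈ comps, (a ∈ c ∨ b ∈ c) ∧ z ∈ c) ↔
        (∃ r ∈ rs, (((d.get? a).isSome ∧ r = Ra) ∨ ((d.get? b).isSome ∧ r = Rb)) ∧
          Root d z r) := by
      refine forall2_exists_iff hfa ?_
      intro c r hrel
      rw [fact1 c r hrel, fact2 c r hrel, hrel.2 z]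
    rw [hexists]
    have hmab : z ∈ PySem.Set.ofList [a, b] ↔ z = a ∨ z = b := by
      rw [PySem.Set.mem_ofList]; simp
    rw [hmab, hchar z Rb]
    constructor
    · rintro ((hza | hzb) | ⟨r, hmem, hdis, hroot⟩)
      · exact ⟨Ra, by rw [hza]; exact hR2a, by rw [if_pos rfl]⟩
      · exact ⟨Rb, by rw [hzb]; exact hR2b, hiteRb.symm⟩
      · rcases hdis with ⟨ha, hra⟩ | ⟨hb, hrb⟩
        · exact ⟨Ra, Or.inl (hra ▸ hroot), by rw [if_pos rfl]⟩
        · exact ⟨Rb, Or.inl (hrb ▸ hroot), hiteRb.symm⟩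
    · rintro ⟨s, h2, hite⟩
      rcases h2 with h2 | ⟨hn, hzab, hsz⟩
      · -- z has an old root s, and s = Ra or s = Rb
        have hssome : (d.get? s).isSome := by
          obtain ⟨f, hf⟩ := h2
          rw [root_self d f z s hf]; simp
        by_cases hsa : s = Ra
        · have ha : (d.get? a).isSome := by
            rcases hRaFact with ⟨ha, _⟩ | ⟨hn, heq⟩
            · exact ha
            · rw [hsa, heq, hn] at hssome; simp at hssome
          obtain ⟨r0, hr0mem, hr0⟩ := hcov a ha
          have hr0s : r0 = s := by
            rcases hRaFact with ⟨_, hroot⟩ | ⟨hn, _⟩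
            · rw [hsa]; exact root_unique d a r0 Ra hr0 hroot
            · rw [hn] at ha; simp at ha
          exact Or.inr ⟨s, hr0s ▸ hr0mem, Or.inl ⟨ha, hsa⟩, h2⟩
        · have hsRb : s = Rb := by rw [if_neg hsa] at hite; exact hite.symm
          have hb : (d.get? b).isSome := by
            rcases hRbFact with ⟨hb, _⟩ | ⟨hn, heq⟩
            · exact hb
            · rw [hsRb, heq, hn] at hssome; simp at hssome
          obtain ⟨r0, hr0mem, hr0⟩ := hcov b hb
          have hr0s : r0 = s := by
            rcases hRbFact with ⟨_, hroot⟩ | ⟨hn, _⟩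
            · rw [hsRb]; exact root_unique d b r0 Rb hr0 hroot
            · rw [hn] at hb; simp at hb
          exact Or.inr ⟨s, hr0s ▸ hr0mem, Or.inr ⟨hb, hsRb⟩, h2⟩
      · exact Or.inl hzab
  -- assemble
  refine ⟨rs.filter q ++ [Rb], hF', hnd', ?_, ?_, ?_⟩
  · -- Forall₂
    rw [hbstep]
    exact pv_forall2_append (forall2_imp_mem (forall2_filter_iff hfa hpq) hkeep)
      (List.Forall₂.cons ⟨hRbroot', hmerged⟩ List.Forall₂.nil)
  · -- Nodup
    rw [List.nodup_append]
    refine ⟨hrsnd.filter q, List.nodup_singleton Rb, ?_⟩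
    intro r hr y hy heq
    have hy' : y = Rb := by simpa using hy
    have hqr : q r = true := List.of_mem_filter hr
    exact (hqne r (hrs_isSome r (List.mem_of_mem_filter hr)) hqr).2 (heq.trans hy')
  · -- coverage
    intro z hz
    rcases (hkeys' z).mp hz with hsome | hza | hzb
    · obtain ⟨r, hrmem, hroot⟩ := hcov z hsome
      by_cases hra : r = Ra
      · refine ⟨Rb, by simp, ?_⟩
        have := htr' z r (Or.inl hroot)
        rwa [if_pos hra] at this
      · by_cases hrb : r = Rb
        · refine ⟨Rb, by simp, ?_⟩
          have := htr' z r (Or.inl hroot)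
          rwa [if_neg hra, hrb] at this
        · refine ⟨r, ?_, ?_⟩
          · refine List.mem_append_left _ (List.mem_filter.mpr ⟨hrmem, ?_⟩)
            rw [hq]
            simp only [Bool.not_eq_true', decide_eq_false_iff_not, not_or, not_and]
            exact ⟨fun _ => hra, fun _ => hrb⟩
          · have := htr' z r (Or.inl hroot)
            rwa [if_neg hra] at this
    · subst hza
      refine ⟨Rb, by simp, ?_⟩
      have := htr' z Ra hR2a
      rwa [if_pos rfl] at this
    · subst hzb
      exact ⟨Rb, by simp, hRb'⟩

-- The main loop over stones preserves the joint invariant.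
theorem fold_inv : ∀ (stones : List (List Int)) (d : PySem.Dict Int Int)
    (comps : List (PySem.Set Int)) (rs : List Int),
    (∀ s ∈ stones, s.length = 2) → Forest d → d.keys.Nodup → INVR d comps rs →
    ∃ rs', Forest (stones.foldl (fun d s =>
        match s with
        | [x, y] => unionA d x (y + 10 ^ 4)
        | _ => d) d) ∧
      (stones.foldl (fun d s =>
        match s with
        | [x, y] => unionA d x (y + 10 ^ 4)
        | _ => d) d).keys.Nodup ∧
      INVR (stones.foldl (fun d s =>
        match s with
        | [x, y] => unionA d x (y + 10 ^ 4)
        | _ => d) d)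
        (stones.foldl bApply comps) rs' := by
  intro stones
  induction stones with
  | nil => intro d comps rs _ hF hnd hinv; exact ⟨rs, hF, hnd, hinv⟩
  | cons s rest ih =>
    intro d comps rs hlen hF hnd hinv
    match s, hlen s (List.mem_cons_self ..) with
    | [x, y], _ =>
      have hred : bApply comps [x, y] = bStep comps x (y + 10 ^ 4) := by simp [bApply]
      simp only [List.foldl_cons, hred]
      obtain ⟨rs1, hF1, hnd1, hinv1⟩ := step_inv d comps rs x (y + 10 ^ 4) hF hnd hinv
      exact ih (unionA d x (y + 10 ^ 4)) (bStep comps x (y + 10 ^ 4)) rs1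
        (fun s' hs' => hlen s' (List.mem_cons_of_mem _ hs')) hF1 hnd1 hinv1

-- The final comprehension {find(key) for key in uf} collects exactly the roots.
theorem final_fold : ∀ (ks : List Int) (S : PySem.Set Int) (dc : PySem.Dict Int Int),
    Forest dc → dc.keys.Nodup → (∀ k ∈ ks, (dc.get? k).isSome) → S.Nodup →
    (ks.foldl (fun (p : PySem.Set Int × PySem.Dict Int Int) k =>
        let rd := findA p.2.size p.2 k
        (PySem.Set.add p.1 rd.1, rd.2)) (S, dc)).1.Nodup ∧
    (∀ r, r ∈ (ks.foldl (fun (p : PySem.Set Int × PySem.Dict Int Int) k =>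
        let rd := findA p.2.size p.2 k
        (PySem.Set.add p.1 rd.1, rd.2)) (S, dc)).1 ↔
      r ∈ S ∨ ∃ k ∈ ks, Root dc k r) := by
  intro ks
  induction ks with
  | nil => intro S dc _ _ _ hS; exact ⟨hS, fun r => by simp⟩
  | cons k rest ih =>
    intro S dc hF hnd hks hS
    obtain ⟨rk, hrk⟩ := forest_total dc hF k (hks k (List.mem_cons_self ..))
    obtain ⟨f0, hf0⟩ := hrk
    have hrk : Root dc k rk := ⟨f0, hf0⟩
    have hfuel : rootAux dc dc.size k = some rk := rootAux_size dc hF f0 k rk hf0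
    obtain ⟨h1, hF2, hk2, htr2⟩ := findA_spec dc.size dc k rk hF hfuel
    have hkeys2 : ∀ z, ((findA dc.size dc k).2.get? z).isSome ↔ (dc.get? z).isSome := by
      intro z
      rw [isSome_iff_mem_keys, isSome_iff_mem_keys, hk2]
    have hiff : ∀ z s, Root (findA dc.size dc k).2 z s ↔ Root dc z s :=
      root_iff_of_transport dc (findA dc.size dc k).2 hF hkeys2 htr2
    simp only [List.foldl_cons]
    rw [h1]
    obtain ⟨ihn, ihm⟩ := ih (PySem.Set.add S rk) (findA dc.size dc k).2 hF2
      (by rw [hk2]; exact hnd)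
      (fun k' hk' => (hkeys2 k').mpr (hks k' (List.mem_cons_of_mem _ hk')))
      (PySem.Set.nodup_add S rk hS)
    refine ⟨ihn, ?_⟩
    intro r
    rw [ihm r, PySem.Set.mem_add]
    constructor
    · rintro ((h | h) | ⟨k', hk', hroot⟩)
      · exact Or.inl h
      · exact Or.inr ⟨k, List.mem_cons_self .., h ▸ hrk⟩
      · exact Or.inr ⟨k', List.mem_cons_of_mem _ hk', (hiff k' r).mp hroot⟩
    · rintro (h | ⟨k', hk', hroot⟩)
      · exact Or.inl (Or.inl h)
      · rcases List.mem_cons.mp hk' with rfl | hk'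
        · exact Or.inl (Or.inr (root_unique dc k' r rk hroot hrk))
        · exact Or.inr ⟨k', hk', (hiff k' r).mpr hroot⟩

theorem forest_empty : Forest (PySem.Dict.empty : PySem.Dict Int Int) := by
  constructor
  · intro x p h
    rw [PySem.Dict.get?_empty] at h
    cases h
  · refine ⟨fun _ => 0, ?_⟩
    intro x p h
    rw [PySem.Dict.get?_empty] at h
    cases h

-- ===== VERDICT (by name: the statement is the Claim_ definition above) =====
theorem removeStones_spec : Claim_equal_removeStones := by
  unfold Claim_equal_removeStones Spec_removeStones
  intro stones _ hpre
  have hinv0 : INVR PySem.Dict.empty [] [] := by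
    refine ⟨List.Forall₂.nil, List.nodup_nil, ?_⟩
    intro z hz
    rw [PySem.Dict.get?_empty] at hz
    cases hz
  obtain ⟨rs, hF, hnd, hfa, hrsnd, hcov⟩ :=
    fold_inv stones PySem.Dict.empty [] [] hpre forest_empty (by simp) hinv0
  set uf := stones.foldl (fun d s =>
      match s with
      | [x, y] => unionA d x (y + 10 ^ 4)
      | _ => d) PySem.Dict.empty with huf
  set comps := stones.foldl bApply ([] : List (PySem.Set Int)) with hcomps
  obtain ⟨hFSnd, hFSm⟩ := final_fold uf.keys PySem.Set.empty uf hF hnd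
    (fun k hk => (isSome_iff_mem_keys uf k).mpr hk) List.nodup_nil
  have hmem : ∀ r, r ∈ (uf.keys.foldl (fun (p : PySem.Set Int × PySem.Dict Int Int) k =>
      let rd := findA p.2.size p.2 k
      (PySem.Set.add p.1 rd.1, rd.2)) (PySem.Set.empty, uf)).1 ↔ r ∈ rs := by
    intro r
    rw [hFSm r]
    constructor
    · rintro (h | ⟨k, hk, hroot⟩)
      · simp [PySem.Set.empty] at h
      · obtain ⟨r', hr', hroot'⟩ := hcov k ((isSome_iff_mem_keys uf k).mpr hk)
        exact (root_unique uf k r r' hroot hroot') ▸ hr'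
    · intro h
      obtain ⟨c, _, hrel⟩ := forall2_mem_right hfa r h
      refine Or.inr ⟨r, ?_, hrel.1⟩
      exact mem_keys_of_isSome uf r (root_isSome uf r r hrel.1)
  have hlen : (uf.keys.foldl (fun (p : PySem.Set Int × PySem.Dict Int Int) k =>
      let rd := findA p.2.size p.2 k
      (PySem.Set.add p.1 rd.1, rd.2)) (PySem.Set.empty, uf)).1.length = rs.length :=
    ((List.perm_ext_iff_of_nodup hFSnd hrsnd).mpr hmem).length_eq
  have hclen : comps.length = rs.length := List.Forall₂.length_eq hfa
  show removeStones stones = removeStones_alt stones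
  rw [removeStones, removeStones_alt]
  simp only [← huf, ← hcomps]
  rw [hlen, hclen]
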